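-- pv_equiv track=rewrite | github.com/thamudi/ExportComments | main.py | GetPostID
-- ===== SOURCE A (Python) =====
-- def GetPostID(url):
--     lista=[str(x) for x in range(10)]
--     url=url[url.find('m')+2:]+"azezea"
--     new,new2,new1=("",)*3
--     for i in range(len(url)):
--         if url[i] in lista:new+=url[i]
--         else: break
--     for i in range(len(url)):
--         if url[i] in ["/"] and url[i+1] in lista:
--             new2=url[i+1:]
--             for j in range(len(new2)) :
--                 if new2[j] in lista: new1+=new2[j]
--     return str(new1)
-- ===== SOURCE B (Python) =====
-- from bisect import bisect_right
--
-- def GetPostID(url):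
--     s = url[url.find('m') + 2:] + "azezea"
--     digit_pos = []
--     digit_chars = []
--     for i, c in enumerate(s):
--         if '0' <= c <= '9':
--             digit_pos.append(i)
--             digit_chars.append(c)
--     parts = []
--     for i in range(len(s) - 1):
--         if s[i] == '/' and '0' <= s[i + 1] <= '9':
--             k = bisect_right(digit_pos, i)
--             parts.append(''.join(digit_chars[k:]))
--     return ''.join(parts)
-- ===== Notes on version B (the rewrite author's own statement) =====
-- stated objective: alternative
-- what changed: B removes A's dead digit-prefix loop and, instead of A's per-slash rescan of the whole padded suffix, builds the digit positions/characters once in a single pass and takes each qualifying slash's contribution by bisecting into that index.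
import Mathlib
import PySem

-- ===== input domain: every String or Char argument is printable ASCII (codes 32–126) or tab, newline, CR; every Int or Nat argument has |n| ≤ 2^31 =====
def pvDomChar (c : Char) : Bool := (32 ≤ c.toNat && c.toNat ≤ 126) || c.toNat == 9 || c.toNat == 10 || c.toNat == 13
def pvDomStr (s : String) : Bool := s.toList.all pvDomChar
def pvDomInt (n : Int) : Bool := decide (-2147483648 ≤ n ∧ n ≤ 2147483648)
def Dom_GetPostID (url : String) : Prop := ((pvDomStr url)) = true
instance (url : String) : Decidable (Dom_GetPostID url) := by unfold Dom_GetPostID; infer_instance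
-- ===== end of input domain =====

-- B drops A's dead first loop and replaces A's per-slash rescan of the whole suffix by one
-- digit-collecting pass plus a bisect per qualifying slash (objective: alternative).

-- ===== PORT A =====
-- lista = [str(x) for x in range(10)]
def pvLista : List (List Char) := (PySem.List.pyRange 0 10 1).map PySem.Int.toChars

-- first loop of A: appends digits until the first non-digit, then break (its result is dead code)
def pvBreakLoop (lista : List (List Char)) : List Char → List Char
  | [] => []
  | c :: rest => if lista.contains [c] then c :: pvBreakLoop lista rest else []

def GetPostID (url : String) : String :=
  let lista := pvLista
  let u : List Char :=
    PySem.List.slice url.toList (some (PySem.Str.find url "m" + 2)) none ++ "azezea".toList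
  let _new := pvBreakLoop lista u   -- dead: A never uses `new`
  let new1 := (List.range u.length).foldl (fun (new1 : List Char) (i : Nat) =>
    if (match PySem.List.pyGet? u (i : Int) with
        | some c => [[('/' : Char)]].contains [c]
        | none => false) then
      -- url[i+1]: always in range when url[i] = '/' (the "azezea" padding ends in 'a')
      match PySem.List.pyGet? u ((i : Int) + 1) with
      | some d =>
        if lista.contains [d] then
          let new2 := PySem.List.slice u (some ((i : Int) + 1)) none
          new2.foldl (fun a e => if lista.contains [e] then a ++ [e] else a) new1
        else new1
      | none => new1   -- unreachable (Python would raise IndexError)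
    else new1) []
  String.ofList new1

-- ===== PORT B =====
def pvIsDig (c : Char) : Bool := decide ('0' ≤ c ∧ c ≤ '9')

-- single pass of Source B collecting digit positions and digit characters, in order
def pvDigitScan : List Char → Int → List Int × List Char
  | [], _ => ([], [])
  | c :: rest, i =>
    if pvIsDig c then
      let (ps, cs) := pvDigitScan rest (i + 1)
      (i :: ps, c :: cs)
    else pvDigitScan rest (i + 1)

def GetPostID_alt (url : String) : String :=
  let s : List Char :=
    PySem.List.slice url.toList (some (PySem.Str.find url "m" + 2)) none ++ "azezea".toList
  let dp := pvDigitScan s 0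
  let parts := (PySem.List.pyRange 0 ((s.length : Int) - 1) 1).foldl (fun parts i =>
    if ((match PySem.List.pyGet? s i with
         | some c => c == '/'
         | none => false)
        && (match PySem.List.pyGet? s (i + 1) with
            | some d => pvIsDig d
            | none => false)) then
      parts ++ [dp.2.drop (PySem.List.bisectRight dp.1 i)]
    else parts) []
  String.ofList (PySem.Chars.join [] parts)

-- ===== PRECONDITION & SPEC =====
def Spec_GetPostID (url : String) (out : String) : Prop := out = GetPostID_alt url
instance (url : String) (out : String) : Decidable (Spec_GetPostID url out) := by unfold Spec_GetPostID; infer_instance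

-- ===== CLAIM (what is proved, stated in full; the proofs are below) =====
def Claim_equal_GetPostID : Prop := ∀ (url : String), Dom_GetPostID url → Spec_GetPostID url (GetPostID url)

-- ===== LEMMAS AND PROOFS =====

/-- the contribution of index `i` to the result: the digits of `u[i+1:]` when `u[i] = '/'`
and `u[i+1]` is a digit, else nothing -/
def pvF (u : List Char) (i : Nat) : List Char :=
  match u[i]?, u[i + 1]? with
  | some c, some d => if c == '/' && pvIsDig d then (u.drop (i + 1)).filter pvIsDig else []
  | _, _ => []

/-- reference insertion point: length of the maximal ≤-prefix -/
def pvCnt (x : Int) : List Int → Nat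
  | [] => 0
  | a :: l => if a ≤ x then pvCnt x l + 1 else 0

lemma lista_contains (c : Char) : pvLista.contains [c] = pvIsDig c := by
  have h : pvLista = [['0'],['1'],['2'],['3'],['4'],['5'],['6'],['7'],['8'],['9']] := by decide
  rw [h]
  have hc : ∀ (d : Char), c.val.toNat = d.val.toNat → c = d := by
    intro d hd; exact Char.ext (UInt32.toNat_inj.mp hd)
  simp only [List.contains_cons, List.contains_nil, Bool.or_false, List.cons_beq_cons, pvIsDig,
    Char.le_def, UInt32.le_iff_toNat_le]
  apply Bool.eq_iff_iff.mpr
  simp only [Bool.or_eq_true, Bool.and_eq_true, beq_iff_eq, decide_eq_true_eq, BEq.refl, and_true]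
  constructor
  · rintro (rfl|rfl|rfl|rfl|rfl|rfl|rfl|rfl|rfl|rfl) <;> simp
  · rintro ⟨h1, h2⟩
    simp at h1 h2
    have hv : c.val.toNat = c.toNat := rfl
    have : c.val.toNat = 48 ∨ c.val.toNat = 49 ∨ c.val.toNat = 50 ∨ c.val.toNat = 51 ∨
      c.val.toNat = 52 ∨ c.val.toNat = 53 ∨ c.val.toNat = 54 ∨ c.val.toNat = 55 ∨
      c.val.toNat = 56 ∨ c.val.toNat = 57 := by omega
    rcases this with h|h|h|h|h|h|h|h|h|h
    · exact Or.inl (hc '0' h)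
    · exact Or.inr (Or.inl (hc '1' h))
    · exact Or.inr (Or.inr (Or.inl (hc '2' h)))
    · exact Or.inr (Or.inr (Or.inr (Or.inl (hc '3' h))))
    · exact Or.inr (Or.inr (Or.inr (Or.inr (Or.inl (hc '4' h)))))
    · exact Or.inr (Or.inr (Or.inr (Or.inr (Or.inr (Or.inl (hc '5' h))))))
    · exact Or.inr (Or.inr (Or.inr (Or.inr (Or.inr (Or.inr (Or.inl (hc '6' h)))))))
    · exact Or.inr (Or.inr (Or.inr (Or.inr (Or.inr (Or.inr (Or.inr (Or.inl (hc '7' h))))))))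
    · exact Or.inr (Or.inr (Or.inr (Or.inr (Or.inr (Or.inr (Or.inr (Or.inr (Or.inl (hc '8' h)))))))))
    · exact Or.inr (Or.inr (Or.inr (Or.inr (Or.inr (Or.inr (Or.inr (Or.inr (Or.inr (hc '9' h)))))))))

lemma slash_contains (c : Char) : ([[('/' : Char)]].contains [c]) = (c == '/') := by
  simp only [List.contains_cons, List.contains_nil, Bool.or_false, List.cons_beq_cons]
  simp

lemma join_nil_flatten (parts : List (List Char)) : PySem.Chars.join [] parts = parts.flatten := by
  induction parts with
  | nil => rfl
  | cons p t ih =>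
    cases t with
    | nil => simp [PySem.Chars.join, List.intercalate]
    | cons q r =>
      simp only [PySem.Chars.join, List.intercalate, List.intersperse] at *
      simp [List.flatten_cons, ih]

lemma digitScan_chars (s : List Char) : ∀ (n : Int), (pvDigitScan s n).2 = s.filter pvIsDig := by
  induction s with
  | nil => intro n; rfl
  | cons c rest ih =>
    intro n
    by_cases h : pvIsDig c <;> simp [pvDigitScan, h, ih]

lemma digitScan_pos_lb (s : List Char) : ∀ (n : Int), ∀ x ∈ (pvDigitScan s n).1, n ≤ x := by
  induction s with
  | nil => intro n x hx; simp [pvDigitScan] at hx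
  | cons c rest ih =>
    intro n x hx
    by_cases h : pvIsDig c <;> simp [pvDigitScan, h] at hx
    · rcases hx with rfl | hx
      · exact le_refl x
      · have := ih (n+1) x hx; omega
    · have := ih (n+1) x hx; omega

lemma digitScan_sorted (s : List Char) : ∀ (n : Int), List.Pairwise (fun a b => a ≤ b) (pvDigitScan s n).1 := by
  induction s with
  | nil => intro n; simp [pvDigitScan]
  | cons c rest ih =>
    intro n
    by_cases h : pvIsDig c <;> simp [pvDigitScan, h]
    · exact ⟨fun x hx => by have := digitScan_pos_lb rest (n+1) x hx; omega, ih (n+1)⟩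
    · exact ih (n+1)

lemma pvCnt_le_length (x : Int) (xs : List Int) : pvCnt x xs ≤ xs.length := by
  induction xs with
  | nil => simp [pvCnt]
  | cons a l ih =>
    by_cases h : a ≤ x
    · simp [pvCnt, h]; omega
    · simp [pvCnt, h]

lemma pvCnt_spec_lt (x : Int) (xs : List Int) (h : List.Pairwise (fun a b => a ≤ b) xs) :
    ∀ j (hj : j < xs.length), j < pvCnt x xs → xs[j] ≤ x := by
  induction xs with
  | nil => simp
  | cons a l ih =>
    intro j hj hlt
    by_cases ha : a ≤ x
    · cases j with
      | zero => simpa using ha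
      | succ j' =>
        simp only [pvCnt, if_pos ha] at hlt
        simpa using ih (List.Pairwise.of_cons h) j' (by simpa using hj) (by omega)
    · simp [pvCnt, ha] at hlt

lemma pvCnt_spec_ge (x : Int) (xs : List Int) (h : List.Pairwise (fun a b => a ≤ b) xs) :
    ∀ j (hj : j < xs.length), pvCnt x xs ≤ j → x < xs[j] := by
  induction xs with
  | nil => simp
  | cons a l ih =>
    intro j hj hge
    by_cases ha : a ≤ x
    · cases j with
      | zero => simp [pvCnt, ha] at hge
      | succ j' =>
        simp only [pvCnt, if_pos ha] at hge
        simpa using ih (List.Pairwise.of_cons h) j' (by simpa using hj) (by omega)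
    · cases j with
      | zero => simpa using by omega
      | succ j' =>
        have hal : ∀ b ∈ l, a ≤ b := (List.pairwise_cons.mp h).1
        have hb : l[j']'(by simpa using hj) ∈ l := List.getElem_mem _
        have := hal _ hb
        simpa using by omega

lemma bisect_eq_cnt (xs : List Int) (x : Int) (h : List.Pairwise (fun a b => a ≤ b) xs) :
    PySem.List.bisectRight xs x = pvCnt x xs := by
  obtain ⟨hle, hsm, hbig⟩ := PySem.List.bisectRight_spec xs x h
  set k := PySem.List.bisectRight xs x with hk
  have hcle := pvCnt_le_length x xs
  rcases Nat.lt_trichotomy k (pvCnt x xs) with hlt | heq | hgt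
  · have h1 := pvCnt_spec_lt x xs h k (by omega) hlt
    have h2 := hbig k (by omega) (le_refl k)
    omega
  · exact heq
  · have h1 := hsm (pvCnt x xs) (by omega) hgt
    have h2 := pvCnt_spec_ge x xs h (pvCnt x xs) (by omega) (le_refl _)
    omega

lemma digit_drop (s : List Char) : ∀ (n i : Int),
    (pvDigitScan s n).2.drop (pvCnt i (pvDigitScan s n).1)
      = (s.drop ((i + 1 - n).toNat)).filter pvIsDig := by
  induction s with
  | nil => intro n i; simp [pvDigitScan, pvCnt]
  | cons c rest ih =>
    intro n i
    by_cases h : pvIsDig c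
    · by_cases hni : n ≤ i
      · have h1 : (i + 1 - n).toNat = (i - n).toNat + 1 := by omega
        have h2 : i + 1 - (n + 1) = i - n := by omega
        simpa [pvDigitScan, h, pvCnt, hni, h1, h2] using ih (n+1) i
      · have h1 : (i + 1 - n).toNat = 0 := by omega
        simp [pvDigitScan, h, pvCnt, hni, h1, digitScan_chars]
    · by_cases hni : n ≤ i
      · have h1 : (i + 1 - n).toNat = (i - n).toNat + 1 := by omega
        have h2 : i + 1 - (n + 1) = i - n := by omega
        simpa [pvDigitScan, h, h1, h2] using ih (n+1) i
      · have h1 : (i + 1 - n).toNat = 0 := by omega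
        have h2 : (i + 1 - (n+1)).toNat = 0 := by omega
        have h3 : (i - n).toNat = 0 := by omega
        simpa [pvDigitScan, h, h1, h2, h3] using ih (n+1) i

lemma inner_fold (l : List Char) (acc : List Char) :
    l.foldl (fun a e => if pvIsDig e then a ++ [e] else a) acc
      = acc ++ l.filter pvIsDig := by
  simpa using PySem.List.foldl_append_if pvIsDig (fun e => e) l acc

lemma flatten_filter_if (p : Nat → Bool) (f : Nat → List Char) (l : List Nat) :
    ((l.filter p).map f).flatten = (l.map (fun a => if p a then f a else [])).flatten := by
  induction l with
  | nil => rfl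
  | cons a t ih => by_cases h : p a <;> simp [h, ih]

lemma A_eval (u : List Char) :
    (List.range u.length).foldl (fun (new1 : List Char) (i : Nat) =>
      if (match PySem.List.pyGet? u (i : Int) with
          | some c => [[('/' : Char)]].contains [c]
          | none => false) then
        match PySem.List.pyGet? u ((i : Int) + 1) with
        | some d =>
          if pvLista.contains [d] then
            (PySem.List.slice u (some ((i : Int) + 1)) none).foldl
              (fun a e => if pvLista.contains [e] then a ++ [e] else a) new1
          else new1
        | none => new1
      else new1) []
    = ((List.range u.length).map (pvF u)).flatten := by
  rw [PySem.List.foldl_congr_mem (List.range u.length) _ (fun acc i => acc ++ pvF u i) []]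
  · exact PySem.List.foldl_append_eq_flatMap (pvF u) (List.range u.length) [] |>.trans (by simp [List.flatMap_def])
  · intro acc i hi
    have hi' : i < u.length := List.mem_range.mp hi
    have hcast : ((i : Int) + 1) = ((i + 1 : Nat) : Int) := by push_cast; ring
    rw [PySem.List.pyGet?_natCast, hcast, PySem.List.pyGet?_natCast]
    have hgi : u[i]? = some (u[i]'hi') := List.getElem?_eq_getElem hi'
    rw [hgi]
    cases hgj : u[i+1]? with
    | none =>
      simp only [pvF, hgi, hgj, slash_contains]
      by_cases hc : u[i]'hi' == '/' <;> simp [hc]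
    | some d =>
      simp only [pvF, hgi, hgj, slash_contains, lista_contains]
      by_cases hc : u[i]'hi' == '/'
      · by_cases hd : pvIsDig d
        · have hs : PySem.List.slice u (some ((i : Int) + 1)) none = u.drop (i + 1) := by
            rw [PySem.List.slice_from u (by omega)]
            norm_num
          simp [hc, hd, hs, inner_fold]
        · simp [hc, hd]
      · simp [hc]

lemma B_eval (u : List Char) (hlen : 1 ≤ u.length) :
    PySem.Chars.join [] ((PySem.List.pyRange 0 ((u.length : Int) - 1) 1).foldl (fun parts i =>
      if ((match PySem.List.pyGet? u i with
           | some c => c == '/'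
           | none => false)
          && (match PySem.List.pyGet? u (i + 1) with
              | some d => pvIsDig d
              | none => false)) then
        parts ++ [(pvDigitScan u 0).2.drop (PySem.List.bisectRight (pvDigitScan u 0).1 i)]
      else parts) [])
    = ((List.range (u.length - 1)).map (pvF u)).flatten := by
  have hn : (u.length : Int) - 1 = ((u.length - 1 : Nat) : Int) := by omega
  rw [hn, PySem.List.pyRange_zero_natCast, List.foldl_map]
  rw [PySem.List.foldl_append_if
    (fun (k : Nat) => ((match PySem.List.pyGet? u (k : Int) with
           | some c => c == '/'
           | none => false)
          && (match PySem.List.pyGet? u ((k : Int) + 1) with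
              | some d => pvIsDig d
              | none => false)))
    (fun (k : Nat) => (pvDigitScan u 0).2.drop (PySem.List.bisectRight (pvDigitScan u 0).1 (k : Int)))]
  rw [join_nil_flatten, List.nil_append, flatten_filter_if]
  congr 1
  apply List.map_congr_left
  intro i hi
  have hi1 : i + 1 < u.length := by have := List.mem_range.mp hi; omega
  have hi' : i < u.length := by omega
  have hcast : ((i : Int) + 1) = ((i + 1 : Nat) : Int) := by push_cast; ring
  rw [PySem.List.pyGet?_natCast, hcast, PySem.List.pyGet?_natCast]
  have hgi : u[i]? = some (u[i]'hi') := List.getElem?_eq_getElem hi'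
  have hgj : u[i+1]? = some (u[i+1]'hi1) := List.getElem?_eq_getElem hi1
  rw [hgi, hgj]
  simp only [pvF, hgi, hgj]
  by_cases hc : (u[i]'hi' == '/') && pvIsDig (u[i+1]'hi1)
  · rw [if_pos hc, if_pos hc]
    rw [bisect_eq_cnt _ _ (digitScan_sorted u 0), digit_drop u 0 (i : Int)]
    congr 1
  · rw [if_neg (by simpa using hc), if_neg (by simpa using hc)]

lemma last_a (t : List Char) :
    (t ++ "azezea".toList)[(t ++ "azezea".toList).length - 1]? = some 'a' := by
  have hlen : (t ++ "azezea".toList).length = t.length + 6 := by simp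
  rw [hlen]
  have h5 : t.length + 6 - 1 = t.length + 5 := by omega
  rw [h5, List.getElem?_append_right (by omega)]
  have : t.length + 5 - t.length = 5 := by omega
  rw [this]
  rfl

lemma pvF_last (t : List Char) :
    pvF (t ++ "azezea".toList) ((t ++ "azezea".toList).length - 1) = [] := by
  unfold pvF
  rw [last_a t]
  cases h : (t ++ "azezea".toList)[(t ++ "azezea".toList).length - 1 + 1]? <;> simp

-- ===== VERDICT (by name: the statement is the Claim_ definition above) =====
theorem GetPostID_spec : Claim_equal_GetPostID := by
  intro url _
  unfold Spec_GetPostID GetPostID GetPostID_alt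
  simp only []
  set t : List Char := PySem.List.slice url.toList (some (PySem.Str.find url "m" + 2)) none with ht
  set u : List Char := t ++ "azezea".toList with hu
  have hlen6 : u.length = t.length + 6 := by simp [hu]
  rw [A_eval u, B_eval u (by omega)]
  congr 1
  have hsplit : u.length = (u.length - 1) + 1 := by omega
  rw [hsplit, List.range_succ, List.map_append, List.flatten_append]
  have : pvF u (u.length - 1) = [] := by
    rw [hu]; exact pvF_last t
  simp [this]
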